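-- pv_equiv track=rewrite | github.com/p1ckLL/stealeyreading | main.py | split_on_chapters
-- ===== SOURCE A (Python) =====
-- def split_on_chapters(text):
--   start = 0
--   chapters = []
--
--   while True:
--     start = text.find("Chapter", start)
--     if start == -1:
--       break
--     end = text.find("Chapter", start + 1)
--     if end == -1:
--       end = len(text)
--     chapters.append(text[start:end])
--     start = end
--
--   return chapters
-- ===== SOURCE B (Python) =====
-- def split_on_chapters(text):
--   return ["Chapter" + part for part in text.split("Chapter")[1:]]
-- ===== Notes on version B (the rewrite author's own statement) =====
-- stated objective: simpler
-- what changed: Replaces the manual while-loop with its start/end index bookkeeping and repeated find calls by a single str.split on the delimiter plus a comprehension that re-attaches the delimiter to each piece and drops the prefix before its first occurrence.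
import Mathlib
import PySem

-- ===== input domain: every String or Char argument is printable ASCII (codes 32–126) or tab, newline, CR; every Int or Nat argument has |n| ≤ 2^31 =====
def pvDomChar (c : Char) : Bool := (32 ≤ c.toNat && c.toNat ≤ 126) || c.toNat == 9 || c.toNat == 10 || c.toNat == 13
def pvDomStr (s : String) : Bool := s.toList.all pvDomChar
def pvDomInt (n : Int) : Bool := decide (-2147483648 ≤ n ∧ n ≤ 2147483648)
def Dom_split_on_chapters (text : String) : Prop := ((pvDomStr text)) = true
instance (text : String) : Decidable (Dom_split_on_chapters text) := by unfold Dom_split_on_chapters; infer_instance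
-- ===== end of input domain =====

-- B replaces A's manual while-loop (start/end bookkeeping, repeated find) by one split on the delimiter plus a comprehension; objective: simpler.

-- ===== PORT A =====
-- A's while-loop: fuel is only the termination measure (start strictly increases each
-- iteration and stays ≤ len(text), so len+2 rounds always suffice); the loop body is literal.
def splitChaptersGo (text : String) (fuel : Nat) (start : Int) (chapters : List String) : List String :=
  match fuel with
  | 0 => chapters
  | fuel + 1 =>
    let start' := PySem.Str.findFrom text "Chapter" start
    if start' = -1 then chapters
    else
      let e0 := PySem.Str.findFrom text "Chapter" (start' + 1)
      let e := if e0 = -1 then PySem.Str.len text else e0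
      splitChaptersGo text fuel e (chapters ++ [PySem.Str.slice text (some start') (some e)])

def split_on_chapters (text : String) : List String :=
  splitChaptersGo text (text.toList.length + 2) 0 []

-- ===== PORT B =====
def split_on_chapters_alt (text : String) : List String :=
  let parts := (PySem.Str.split? text "Chapter").getD []   -- separator is non-empty, so split? is always `some`
  (PySem.List.slice parts (some 1) none).map
    (fun part => String.ofList ("Chapter".toList ++ part.toList))  -- Python's "Chapter" + part: exact concatenation of code points

-- ===== PRECONDITION & SPEC =====
def Spec_split_on_chapters (text : String) (out : List String) : Prop := out = split_on_chapters_alt text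
instance (text : String) (out : List String) : Decidable (Spec_split_on_chapters text out) := by unfold Spec_split_on_chapters; infer_instance

-- ===== CLAIM (what is proved, stated in full; the proofs are below) =====
def Claim_equal_split_on_chapters : Prop := ∀ (text : String), Dom_split_on_chapters text → Spec_split_on_chapters text (split_on_chapters text)

-- ===== LEMMAS AND PROOFS =====

-- "Chapter" as a literal character list
def sepC : List Char := ['C', 'h', 'a', 'p', 't', 'e', 'r']

theorem sepC_eq : "Chapter".toList = sepC := rfl

theorem sepC_ne_nil : sepC ≠ [] := by simp [sepC]

theorem sepC_length : sepC.length = 7 := by simp [sepC]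

theorem go_zero (sep : List Char) (l cur : List Char) (acc : List (List Char)) :
    PySem.Chars.splitOn.go sep 0 l cur acc = ((cur.reverse ++ l) :: acc).reverse := by
  cases l <;> simp [PySem.Chars.splitOn.go]
theorem go_nil (sep : List Char) (fuel : Nat) (cur : List Char) (acc : List (List Char)) :
    PySem.Chars.splitOn.go sep fuel [] cur acc = (cur.reverse :: acc).reverse := by
  cases fuel <;> simp [PySem.Chars.splitOn.go]
theorem go_cons (sep : List Char) (fuel : Nat) (c : Char) (rest cur : List Char) (acc : List (List Char)) :
    PySem.Chars.splitOn.go sep (fuel + 1) (c :: rest) cur acc =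
      if sep.isPrefixOf (c :: rest) then
        PySem.Chars.splitOn.go sep fuel (List.drop sep.length (c :: rest)) [] (cur.reverse :: acc)
      else PySem.Chars.splitOn.go sep fuel rest (c :: cur) acc := by
  simp [PySem.Chars.splitOn.go]

theorem go_nomatch (sep : List Char) (_hsep : sep ≠ []) :
    ∀ (fuel : Nat) (l cur : List Char) (acc : List (List Char)),
      (∀ m, ¬ sep <+: l.drop m) →
      PySem.Chars.splitOn.go sep fuel l cur acc = ((cur.reverse ++ l) :: acc).reverse := by
  intro fuel
  induction fuel with
  | zero => intro l cur acc h; exact go_zero sep l cur acc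
  | succ fuel ih =>
    intro l cur acc h
    cases l with
    | nil => simp [go_nil]
    | cons c rest =>
      rw [go_cons]
      have hnp : sep.isPrefixOf (c :: rest) = false := by
        rw [← Bool.not_eq_true, List.isPrefixOf_iff_prefix]
        exact h 0
      rw [hnp]
      simp only [Bool.false_eq_true, if_false]
      rw [ih rest (c :: cur) acc (fun m => h (m + 1))]
      simp

theorem go_acc (sep : List Char) :
    ∀ (fuel : Nat) (l cur : List Char) (acc : List (List Char)),
      PySem.Chars.splitOn.go sep fuel l cur acc = acc.reverse ++ PySem.Chars.splitOn.go sep fuel l cur [] := by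
  intro fuel
  induction fuel with
  | zero => intro l cur acc; rw [go_zero, go_zero]; simp
  | succ fuel ih =>
    intro l cur acc
    cases l with
    | nil => rw [go_nil, go_nil]; simp
    | cons c rest =>
      rw [go_cons, go_cons]
      split
      · rw [ih _ [] (cur.reverse :: acc), ih _ [] ([cur.reverse])]; simp
      · rw [ih rest (c :: cur) acc]

theorem go_fuel_add (sep : List Char) (hsep : sep ≠ []) :
    ∀ (fuel : Nat) (k : Nat) (l cur : List Char) (acc : List (List Char)),
      l.length ≤ fuel →
      PySem.Chars.splitOn.go sep (fuel + k) l cur acc = PySem.Chars.splitOn.go sep fuel l cur acc := by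
  intro fuel
  induction fuel with
  | zero =>
    intro k l cur acc h
    have : l = [] := by cases l <;> simp_all
    subst this
    rw [go_nil, go_zero]; simp
  | succ fuel ih =>
    intro k l cur acc h
    cases l with
    | nil => rw [go_nil, go_nil]
    | cons c rest =>
      have : fuel + 1 + k = (fuel + k) + 1 := by omega
      rw [this, go_cons, go_cons]
      split
      · rename_i hp
        apply ih
        have hlen : sep.length ≥ 1 := by cases sep <;> simp_all
        simp only [List.length_drop, List.length_cons] at *
        omega
      · apply ih
        simp at h ⊢; omega

theorem go_fuel (sep : List Char) (hsep : sep ≠ []) (fuel₁ fuel₂ : Nat) (l cur : List Char)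
    (acc : List (List Char)) (h1 : l.length ≤ fuel₁) (h2 : l.length ≤ fuel₂) :
    PySem.Chars.splitOn.go sep fuel₁ l cur acc = PySem.Chars.splitOn.go sep fuel₂ l cur acc := by
  have e1 : fuel₁ = l.length + (fuel₁ - l.length) := by omega
  have e2 : fuel₂ = l.length + (fuel₂ - l.length) := by omega
  rw [e1, e2, go_fuel_add sep hsep _ _ _ _ _ (by omega), go_fuel_add sep hsep _ _ _ _ _ (by omega)]
theorem go_match (sep : List Char) (hsep : sep ≠ []) :
    ∀ (a : List Char) (fuel : Nat) (r cur : List Char) (acc : List (List Char)),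
      a.length + 1 ≤ fuel →
      (∀ m, m < a.length → ¬ sep <+: (a ++ sep ++ r).drop m) →
      PySem.Chars.splitOn.go sep fuel (a ++ sep ++ r) cur acc =
        PySem.Chars.splitOn.go sep (fuel - (a.length + 1)) r [] ((cur.reverse ++ a) :: acc) := by
  intro a
  induction a with
  | nil =>
    intro fuel r cur acc hfuel hnm
    obtain ⟨fuel, rfl⟩ : ∃ f, fuel = f + 1 := ⟨fuel - 1, by omega⟩
    cases hs : sep with
    | nil => exact absurd hs hsep
    | cons c srest =>
      rw [← hs]
      simp only [List.nil_append]
      have : sep ++ r = c :: (srest ++ r) := by rw [hs]; simp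
      rw [this, go_cons, ← this]
      have hp : sep.isPrefixOf (sep ++ r) = true := by
        rw [List.isPrefixOf_iff_prefix]; exact List.prefix_append sep r
      rw [hp]
      simp
  | cons c a' ih =>
    intro fuel r cur acc hfuel hnm
    obtain ⟨fuel, rfl⟩ : ∃ f, fuel = f + 1 := ⟨fuel - 1, by omega⟩
    simp only [List.cons_append]
    rw [go_cons]
    have hnp : sep.isPrefixOf (c :: (a' ++ sep ++ r)) = false := by
      rw [← Bool.not_eq_true, List.isPrefixOf_iff_prefix]
      have := hnm 0 (by simp)
      simpa using this
    rw [hnp]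
    simp only [Bool.false_eq_true, if_false]
    rw [ih fuel r (c :: cur) acc (by simp at hfuel ⊢; omega)
      (fun m hm => by simpa using hnm (m + 1) (by simp; omega))]
    have e1 : fuel + 1 - ((c :: a').length + 1) = fuel - (a'.length + 1) := by
      simp only [List.length_cons]; omega
    have e2 : (c :: cur).reverse ++ a' = cur.reverse ++ (c :: a') := by simp
    rw [e1, ← e2]
theorem not_prefix_drop_of_not_infix (l sub : List Char) (h : ¬ sub <:+: l) :
    ∀ m, ¬ sub <+: l.drop m := by
  intro m hp
  exact h (List.infix_iff_prefix_suffix.mpr ⟨_, hp, List.drop_suffix m l⟩)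

theorem splitOn_nomatch (sep l : List Char) (hsep : sep ≠ []) (h : ¬ sep <:+: l) :
    PySem.Chars.splitOn l sep = [l] := by
  rw [PySem.Chars.splitOn, go_nomatch sep hsep _ _ _ _ (not_prefix_drop_of_not_infix l sep h)]
  simp

theorem splitOn_match (sep a r : List Char) (hsep : sep ≠ [])
    (hnm : ∀ m, m < a.length → ¬ sep <+: (a ++ sep ++ r).drop m) :
    PySem.Chars.splitOn (a ++ sep ++ r) sep = a :: PySem.Chars.splitOn r sep := by
  have hs1 : 1 ≤ sep.length := by cases sep <;> simp_all
  have hlen : (a ++ sep ++ r).length = a.length + sep.length + r.length := by simp; omega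
  rw [PySem.Chars.splitOn, go_match sep hsep a _ r [] [] (by omega) hnm]
  rw [go_acc, go_fuel sep hsep _ (r.length + 1) r [] [] (by omega) (by omega)]
  rw [PySem.Chars.splitOn]
  simp

theorem find_eq_of (l sub : List Char) (i : Nat) (hp : sub <+: l.drop i)
    (hmin : ∀ m, m < i → ¬ sub <+: l.drop m) : PySem.Chars.find l sub = i := by
  have hin : PySem.Chars.isIn sub l = true :=
    (PySem.Chars.exists_prefix_drop_iff_isIn sub l).mp ⟨i, hp⟩
  have h0 : 0 ≤ PySem.Chars.find l sub :=
    (PySem.Chars.find_nonneg_iff l sub).mpr ((PySem.Chars.isIn_iff_infix sub l).mp hin)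
  obtain ⟨hp', hmin'⟩ := PySem.Chars.find_spec h0
  have htn : (PySem.Chars.find l sub).toNat = i := by
    rcases lt_trichotomy (PySem.Chars.find l sub).toNat i with h | h | h
    · exact absurd hp' (hmin _ h)
    · exact h
    · exact absurd hp (hmin' i h)
  omega

theorem not_prefix_drop_of_find_neg (l sub : List Char) (h : PySem.Chars.find l sub = -1) :
    ∀ m, ¬ sub <+: l.drop m := by
  exact not_prefix_drop_of_not_infix l sub ((PySem.Chars.find_eq_neg_one_iff l sub).mp h)

theorem sepC_no_self_overlap (u : List Char) (m : Nat) (h1 : 1 ≤ m) (h2 : m ≤ 6) :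
    ¬ sepC <+: (sepC ++ u).drop m := by
  intro h
  have hd : (sepC ++ u).drop m = sepC.drop m ++ u :=
    List.drop_append_of_le_length (by simp [sepC]; omega)
  rw [hd] at h
  obtain ⟨w, hw⟩ := h
  interval_cases m <;> simp [sepC] at hw

theorem drop_append_ge (l1 l2 : List Char) (n : Nat) (h : l1.length ≤ n) :
    List.drop n (l1 ++ l2) = List.drop (n - l1.length) l2 := by
  rw [List.drop_append, List.drop_eq_nil_of_le h]; simp

theorem find_shift_neg (r : List Char) (h : PySem.Chars.find r sepC = -1) :
    PySem.Chars.find ((sepC ++ r).drop 1) sepC = -1 := by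
  rw [PySem.Chars.find_eq_neg_one_iff]
  intro hinf
  obtain ⟨m, hp⟩ := (PySem.Chars.exists_prefix_drop_iff_isIn sepC _).mpr
    ((PySem.Chars.isIn_iff_infix sepC _).mpr hinf)
  rw [List.drop_drop, Nat.add_comm 1 m] at hp
  by_cases hm : m + 1 ≤ 6
  · exact sepC_no_self_overlap r (m + 1) (by omega) hm hp
  · rw [drop_append_ge _ _ _ (by rw [sepC_length]; omega), sepC_length] at hp
    exact not_prefix_drop_of_find_neg r sepC h _ hp

theorem find_shift_pos (r : List Char) (j : Nat) (h : PySem.Chars.find r sepC = j) :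
    PySem.Chars.find ((sepC ++ r).drop 1) sepC = (6 + j : Nat) := by
  have h0 : (0:Int) ≤ PySem.Chars.find r sepC := by rw [h]; positivity
  obtain ⟨hp', hmin'⟩ := PySem.Chars.find_spec h0
  have htn : (PySem.Chars.find r sepC).toNat = j := by omega
  rw [htn] at hp' hmin'
  apply find_eq_of
  · rw [List.drop_drop, drop_append_ge _ _ _ (by rw [sepC_length]; omega), sepC_length]
    have : 1 + (6 + j) - 7 = j := by omega
    rw [this]; exact hp'
  · intro m hm hp
    rw [List.drop_drop, Nat.add_comm 1 m] at hp
    by_cases hm6 : m + 1 ≤ 6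
    · exact sepC_no_self_overlap r (m + 1) (by omega) hm6 hp
    · rw [drop_append_ge _ _ _ (by rw [sepC_length]; omega), sepC_length] at hp
      exact hmin' _ (by omega) hp
-- first-occurrence data from find ≠ -1
theorem find_pos_parts (l : List Char) (h : PySem.Chars.find l sepC ≠ -1) :
    ∃ i : Nat, PySem.Chars.find l sepC = i ∧ sepC <+: l.drop i ∧ ∀ m, m < i → ¬ sepC <+: l.drop m := by
  have hb := PySem.Chars.neg_one_le_find l sepC
  have h0 : 0 ≤ PySem.Chars.find l sepC := by omega
  obtain ⟨hp, hmin⟩ := PySem.Chars.find_spec h0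
  refine ⟨(PySem.Chars.find l sepC).toNat, by omega, hp, ?_⟩
  intro m hm
  exact hmin m hm

-- decomposition at an occurrence
theorem decomp (l : List Char) (i : Nat) (hp : sepC <+: l.drop i) :
    l.drop i = sepC ++ l.drop (i + 7) ∧ l = l.take i ++ sepC ++ l.drop (i + 7) ∧
      (l.take i).length = i ∧ i + 7 ≤ l.length := by
  obtain ⟨w, hw⟩ := hp
  have hlen7 : 7 ≤ (l.drop i).length := by
    rw [← hw]; simp [sepC_length]
  have hi7 : i + 7 ≤ l.length := by
    simp only [List.length_drop] at hlen7; omega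
  have hweq : w = l.drop (i + 7) := by
    have h1 : (sepC ++ w).drop 7 = w := by
      rw [← sepC_length, List.drop_left]
    rw [hw, List.drop_drop] at h1
    exact h1.symm
  refine ⟨by rw [← hw, hweq], ?_, ?_, hi7⟩
  · conv_lhs => rw [← List.take_append_drop i l]
    rw [← hw, hweq, List.append_assoc]
  · simp
    omega

theorem loop_eq (text : String) :
    ∀ (fuel : Nat) (s : Nat) (acc : List String),
      s ≤ text.toList.length → text.toList.length - s < fuel →
      splitChaptersGo text fuel (s : Int) acc =
        acc ++ ((PySem.Chars.splitOn (text.toList.drop s) sepC).tail).map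
          (fun p => String.ofList (sepC ++ p)) := by
  intro fuel
  induction fuel with
  | zero => intro s acc h1 h2; omega
  | succ fuel ih =>
    intro s acc hs hfuel
    set cs := text.toList with hcs
    set t := cs.drop s with ht
    have hff : PySem.Str.findFrom text "Chapter" (s : Int) =
        (if PySem.Chars.find t sepC = -1 then -1 else (s : Int) + PySem.Chars.find t sepC) := by
      rw [PySem.Str.findFrom_eq, sepC_eq, PySem.Chars.findFrom_natCast _ _ s hs]
    by_cases h1 : PySem.Chars.find t sepC = -1
    · -- no occurrence: loop ends, splitOn gives a single piece
      rw [splitChaptersGo]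
      simp only [hff, h1, if_true]
      rw [splitOn_nomatch sepC t sepC_ne_nil ((PySem.Chars.find_eq_neg_one_iff t sepC).mp h1)]
      simp
    · -- first occurrence at i
      obtain ⟨i, hfi, hp, hmin⟩ := find_pos_parts t h1
      obtain ⟨hti, hteq, htake, hi7⟩ := decomp t i hp
      have htlen : t.length = cs.length - s := by simp [ht]
      -- the else-branch is taken
      have hne : ¬ ((if PySem.Chars.find t sepC = -1 then (-1 : Int) else (s : Int) + PySem.Chars.find t sepC) = -1) := by
        rw [if_neg h1, hfi]; omega
      have hii : ¬((i : Int) = -1) := by omega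
      have hsi : ¬((s : Int) + (i : Int) = -1) := by omega
      rw [splitChaptersGo]
      simp only [hff, hfi, if_neg hii, if_neg hsi]
      -- the second find
      have hcast : (s : Int) + (i : Int) + 1 = ((s + i + 1 : Nat) : Int) := by push_cast; ring
      have hk2 : s + i + 1 ≤ cs.length := by omega
      set r := cs.drop (s + (i + 7)) with hr
      have hrdef : t.drop (i + 7) = r := by
        rw [ht, List.drop_drop]
      have hdrop2 : cs.drop (s + i + 1) = (sepC ++ r).drop 1 := by
        have e1 : cs.drop (s + i + 1) = (t.drop i).drop 1 := by
          rw [ht, List.drop_drop, List.drop_drop]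
          congr 1
        rw [e1, hti, hrdef]
      have hff2 : PySem.Str.findFrom text "Chapter" ((s : Int) + (i : Int) + 1) =
          (if PySem.Chars.find ((sepC ++ r).drop 1) sepC = -1 then -1
           else ((s + i + 1 : Nat) : Int) + PySem.Chars.find ((sepC ++ r).drop 1) sepC) := by
        rw [hcast, PySem.Str.findFrom_eq, sepC_eq, PySem.Chars.findFrom_natCast _ _ _ hk2, hdrop2]
      have hrlen : r.length = cs.length - s - i - 7 := by
        rw [← hrdef]; simp only [List.length_drop]; omega
      -- the chunk slice, generic endpoint b ≥ s + i
      have hslice : ∀ (b : Nat), s + i ≤ b →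
          PySem.Str.slice text (some ((s : Int) + (i : Int))) (some (b : Int)) =
            String.ofList ((sepC ++ r).take (b - (s + i))) := by
        intro b hb
        have e0 : (s : Int) + (i : Int) = ((s + i : Nat) : Int) := by push_cast; ring
        rw [PySem.Str.slice, e0]
        congr 1
        rw [PySem.Chars.slice_eq_listSlice, PySem.List.slice_natCast]
        congr 1
        have e1 : cs.drop (s + i) = t.drop i := by
          rw [ht, List.drop_drop]
        rw [← hcs, e1, hti, hrdef]
      -- t = take i t ++ sepC ++ r, with first occurrence at i
      have hteq' : t = t.take i ++ sepC ++ r := by rw [← hrdef]; exact hteq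
      have hnm : ∀ m, m < (t.take i).length → ¬ sepC <+: (t.take i ++ sepC ++ r).drop m := by
        intro m hm
        rw [← hteq']
        exact hmin m (by omega)
      have hsplit_t : PySem.Chars.splitOn t sepC = t.take i :: PySem.Chars.splitOn r sepC := by
        conv_lhs => rw [hteq']
        exact splitOn_match sepC _ r sepC_ne_nil hnm
      have hlentext : PySem.Str.len text = ((cs.length : Nat) : Int) := by
        simp [PySem.Str.len_eq, hcs]
      by_cases h2 : PySem.Chars.find r sepC = -1
      · -- no further occurrence: last chunk runs to the end of the text
        have hfs : PySem.Chars.find (List.drop 1 (sepC ++ r)) sepC = -1 := find_shift_neg r h2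
        have hE : (if PySem.Str.findFrom text "Chapter" ((s : Int) + (i : Int) + 1) = -1
            then PySem.Str.len text
            else PySem.Str.findFrom text "Chapter" ((s : Int) + (i : Int) + 1)) = ((cs.length : Nat) : Int) := by
          rw [hff2, hfs, if_pos rfl, if_pos rfl, hlentext]
        rw [hE]
        have hbig : (sepC ++ r).length ≤ cs.length - (s + i) := by
          simp only [List.length_append, sepC_length]; omega
        rw [hslice cs.length (by omega), List.take_of_length_le hbig]
        rw [ih cs.length _ (by omega) (by omega), List.drop_length]
        rw [PySem.Chars.splitOn, go_nil]
        rw [hsplit_t, splitOn_nomatch sepC r sepC_ne_nil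
          ((PySem.Chars.find_eq_neg_one_iff r sepC).mp h2)]
        simp
      · -- next occurrence at j inside r
        obtain ⟨j, hfj, hpj, hminj⟩ := find_pos_parts r h2
        obtain ⟨hrj, hreq, hrtake, hj7⟩ := decomp r j hpj
        have hfs : PySem.Chars.find (List.drop 1 (sepC ++ r)) sepC = ((6 + j : Nat) : Int) :=
          find_shift_pos r j hfj
        have hE : (if PySem.Str.findFrom text "Chapter" ((s : Int) + (i : Int) + 1) = -1
            then PySem.Str.len text
            else PySem.Str.findFrom text "Chapter" ((s : Int) + (i : Int) + 1)) = ((s + i + 7 + j : Nat) : Int) := by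
          rw [hff2, hfs, if_neg (by push_cast; omega : ¬(((6 + j : Nat) : Int)) = -1)]
          rw [if_neg (by push_cast; omega)]
          push_cast; ring
        rw [hE]
        have htk : List.take (s + i + 7 + j - (s + i)) (sepC ++ r) = sepC ++ r.take j := by
          rw [List.take_append]
          have e1 : s + i + 7 + j - (s + i) = 7 + j := by omega
          rw [e1, List.take_of_length_le (by rw [sepC_length]; omega), sepC_length]
          have e2 : 7 + j - 7 = j := by omega
          rw [e2]
        rw [hslice (s + i + 7 + j) (by omega), htk]
        rw [ih (s + i + 7 + j) _ (by omega) (by omega)]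
        have hdropj : cs.drop (s + i + 7 + j) = r.drop j := by
          rw [hr, List.drop_drop]
          congr 1
        rw [hdropj]
        have hsplit_dj : PySem.Chars.splitOn (r.drop j) sepC =
            [] :: PySem.Chars.splitOn (r.drop (j + 7)) sepC := by
          rw [hrj]
          have := splitOn_match sepC [] (r.drop (j + 7)) sepC_ne_nil (by intro m hm; simp at hm)
          simpa using this
        have hsplit_r : PySem.Chars.splitOn r sepC =
            r.take j :: PySem.Chars.splitOn (r.drop (j + 7)) sepC := by
          conv_lhs => rw [hreq]
          exact splitOn_match sepC _ _ sepC_ne_nil (by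
            intro m hm
            rw [← hreq]
            exact hminj m (by omega))
        rw [hsplit_dj, hsplit_t, hsplit_r]
        simp

theorem alt_eq (text : String) :
    split_on_chapters_alt text =
      ((PySem.Chars.splitOn text.toList sepC).tail).map (fun p => String.ofList (sepC ++ p)) := by
  rw [split_on_chapters_alt]
  rw [PySem.Str.split?]
  rw [PySem.Chars.split?, if_neg (by simp [sepC_eq, sepC_ne_nil])]
  simp only [Option.map_some, Option.getD_some, PySem.List.slice_from_one]
  rw [← List.map_tail]
  rw [List.map_map]
  apply List.map_congr_left
  intro p hp
  simp [sepC_eq]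

-- ===== VERDICT (by name: the statement is the Claim_ definition above) =====
theorem split_on_chapters_spec : Claim_equal_split_on_chapters := by
  intro text _
  unfold Spec_split_on_chapters
  have h := loop_eq text (text.toList.length + 2) 0 [] (by omega) (by omega)
  simp only [Nat.cast_zero] at h
  rw [split_on_chapters, h, alt_eq]
  simp
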